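-- pv_equiv track=rewrite | github.com/ABHC/SERGE | decoder.py | decodeLegal
-- ===== SOURCE A (Python) =====
-- def decodeLegal(legal_comparator):
-- 	"""Legal description of patents analysis in order to know if the patents is active or not"""
--
-- 	######### LIST FOR INACTIVE LEGAL STATUS
-- 	libre_list = ["patent revoked", "patent withdrawn", "abandonment of patent", "abandonment or withdrawal", "ceased due to", "patent ceased", "complete renunciation", "comple withdrawal", "spc revoked under", "patent expired", "extended patent has ceased", "lapsed due to", "deemed to be withdrawn", "expiry+spc", "expiry+supplementary protection", "expiry+complementary protection certificate", "patent lapsed-:", "§expiry", "§expiry of patent term"]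
--
-- 	legal_abstract = None
--
-- 	######### START DECODING
-- 	for legal_keyword in libre_list:
--
-- 		######### SEARCH FOR MULTIPLE KEYWORDS
-- 		if "+" in legal_keyword and legal_abstract != "INACTIVE":
-- 			legal_keys = legal_keyword.split("+")
-- 			legal_keys_num = len(legal_keys)
-- 			legal_index = 0
-- 			keys_find = 0
--
-- 			while legal_index <= (legal_keys_num - 1):
-- 				if legal_keys[legal_index] in legal_comparator:
-- 					keys_find = keys_find + 1
-- 				legal_index = legal_index + 1
--
-- 			if keys_find == legal_keys_num:
-- 				legal_abstract = "INACTIVE"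
-- 			else:
-- 				legal_abstract = "ACTIVE OR UNCERTAIN"
--
-- 		######### SEARCH FOR A KEYWORD WITH EXCEPTING SPECIFIC WORDS
-- 		elif "-" in legal_keyword and legal_abstract != "INACTIVE":
-- 			legal_keys = legal_keyword.split("-")
-- 			legal_keys_num = len(legal_keys)
-- 			legal_index = 1
-- 			keys_find = 0
--
-- 			while legal_index <= (legal_keys_num - 1):
-- 				if legal_keys[0] in legal_comparator and legal_keys[legal_index] not in legal_comparator:
-- 					keys_find = keys_find + 1
-- 				legal_index = legal_index + 1
--
-- 			if keys_find == (legal_keys_num - 1):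
-- 				legal_abstract = "INACTIVE"
-- 			else:
-- 				legal_abstract = "ACTIVE OR UNCERTAIN"
--
-- 		######### SEARCH AN EXACT EXPRESSION
-- 		elif "§" in legal_keyword and legal_abstract != "INACTIVE":
-- 			legal_keyword = legal_keyword.split("§")
-- 			legal_keyword = legal_keyword[1]
--
-- 			if legal_keyword == legal_comparator:
-- 				legal_abstract = "INACTIVE"
-- 			else:
-- 				legal_abstract = "ACTIVE OR UNCERTAIN"
--
-- 		######### SEARCH A SPECIFIC EXPRESSION
-- 		elif legal_abstract != "INACTIVE":
-- 			if legal_keyword in legal_comparator: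
-- 				legal_abstract = "INACTIVE"
-- 			else:
-- 				legal_abstract = "ACTIVE OR UNCERTAIN"
--
-- 	return legal_abstract
-- ===== SOURCE B (Python) =====
-- # Precompiled rule tables: the markup strings of the original ("+", "-", "\u00a7")
-- # are replaced by four plain data tables, checked in staged passes with early return.
--
-- # plain substring rules (keywords without markup), in the original list order
-- PLAIN_SUBSTRINGS = [
-- 	"patent revoked", "patent withdrawn", "abandonment of patent",
-- 	"abandonment or withdrawal", "ceased due to", "patent ceased",
-- 	"complete renunciation", "comple withdrawal", "spc revoked under",
-- 	"patent expired", "extended patent has ceased", "lapsed due to",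
-- 	"deemed to be withdrawn",
-- ]
-- # "+"-rules: every part must occur as a substring
-- ALL_OF_GROUPS = [
-- 	["expiry", "spc"],
-- 	["expiry", "supplementary protection"],
-- 	["expiry", "complementary protection certificate"],
-- ]
-- # "-"-rules: required substring with forbidden substrings
-- WITH_EXCEPTIONS = [
-- 	("patent lapsed", [":"]),
-- ]
-- # "\u00a7"-rules: whole-string exact matches
-- EXACT_MATCHES = ["expiry", "expiry of patent term"]
--
--
-- def decodeLegal(legal_comparator):
-- 	"""Legal description of patents analysis in order to know if the patents is active or not"""
-- 	for keyword in PLAIN_SUBSTRINGS: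
-- 		if keyword in legal_comparator:
-- 			return "INACTIVE"
-- 	for group in ALL_OF_GROUPS:
-- 		if all(part in legal_comparator for part in group):
-- 			return "INACTIVE"
-- 	for required, forbidden in WITH_EXCEPTIONS:
-- 		if required in legal_comparator and not any(f in legal_comparator for f in forbidden):
-- 			return "INACTIVE"
-- 	if legal_comparator in EXACT_MATCHES:
-- 		return "INACTIVE"
-- 	return "ACTIVE OR UNCERTAIN"
-- ===== Notes on version B (the rewrite author's own statement) =====
-- stated objective: alternative
-- what changed: Replaces A's single loop that parses each keyword's markup ('+','-','§') at call time with a mutable state flag and counting while-loops by four precompiled rule tables (plain substrings, all-of groups, required-with-forbidden, exact matches) checked in staged passes with early return.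
import Mathlib
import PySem

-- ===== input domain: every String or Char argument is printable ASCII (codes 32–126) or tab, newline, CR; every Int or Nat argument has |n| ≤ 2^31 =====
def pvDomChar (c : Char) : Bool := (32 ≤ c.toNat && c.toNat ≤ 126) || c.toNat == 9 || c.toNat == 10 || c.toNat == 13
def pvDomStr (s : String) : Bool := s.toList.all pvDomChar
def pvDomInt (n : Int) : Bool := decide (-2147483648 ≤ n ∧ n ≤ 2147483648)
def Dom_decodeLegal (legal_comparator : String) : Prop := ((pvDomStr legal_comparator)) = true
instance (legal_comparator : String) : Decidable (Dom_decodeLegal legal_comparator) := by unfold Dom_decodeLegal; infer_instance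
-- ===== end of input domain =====

-- B replaces A's call-time parsing of keyword markup ('+'/'-'/'§') with a mutable
-- state flag by four precompiled rule tables checked in staged passes (objective: alternative).

-- ===== PORT A =====
-- The fixed keyword list A hard-codes.
def pvLibreList : List String := ["patent revoked", "patent withdrawn", "abandonment of patent", "abandonment or withdrawal", "ceased due to", "patent ceased", "complete renunciation", "comple withdrawal", "spc revoked under", "patent expired", "extended patent has ceased", "lapsed due to", "deemed to be withdrawn", "expiry+spc", "expiry+supplementary protection", "expiry+complementary protection certificate", "patent lapsed-:", "§expiry", "§expiry of patent term"]

-- One iteration of A's for-loop body (acc = legal_abstract); each counting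
-- while-loop is a fold over pyRange carrying the same counter.
def pvStepA (s : String) (acc : Option String) (kw : String) : Option String :=
  if PySem.Str.isIn "+" kw && decide (acc ≠ some "INACTIVE") then
    let keys := (PySem.Str.split? kw "+").getD []
    let num : Int := PySem.List.len keys
    let keysFind : Int := (PySem.List.pyRange 0 num 1).foldl
      (fun kf i => if PySem.Str.isIn (PySem.List.pyGetD keys i "") s then kf + 1 else kf) 0
    if keysFind == num then some "INACTIVE" else some "ACTIVE OR UNCERTAIN"
  else if PySem.Str.isIn "-" kw && decide (acc ≠ some "INACTIVE") then
    let keys := (PySem.Str.split? kw "-").getD []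
    let num : Int := PySem.List.len keys
    let keysFind : Int := (PySem.List.pyRange 1 num 1).foldl
      (fun kf i => if PySem.Str.isIn (PySem.List.pyGetD keys 0 "") s && !PySem.Str.isIn (PySem.List.pyGetD keys i "") s then kf + 1 else kf) 0
    if keysFind == num - 1 then some "INACTIVE" else some "ACTIVE OR UNCERTAIN"
  else if PySem.Str.isIn "§" kw && decide (acc ≠ some "INACTIVE") then
    let part := PySem.List.pyGetD ((PySem.Str.split? kw "§").getD []) 1 ""
    if part == s then some "INACTIVE" else some "ACTIVE OR UNCERTAIN"
  else if decide (acc ≠ some "INACTIVE") then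
    if PySem.Str.isIn kw s then some "INACTIVE" else some "ACTIVE OR UNCERTAIN"
  else acc

def decodeLegal (legal_comparator : String) : Option String :=
  pvLibreList.foldl (pvStepA legal_comparator) none

-- ===== PORT B =====
-- Source B's precompiled rule tables
def pvPlainSubstrings : List String := ["patent revoked", "patent withdrawn", "abandonment of patent", "abandonment or withdrawal", "ceased due to", "patent ceased", "complete renunciation", "comple withdrawal", "spc revoked under", "patent expired", "extended patent has ceased", "lapsed due to", "deemed to be withdrawn"]
def pvAllOfGroups : List (List String) := [["expiry", "spc"], ["expiry", "supplementary protection"], ["expiry", "complementary protection certificate"]]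
def pvWithExceptions : List (String × List String) := [("patent lapsed", [":"])]
def pvExactMatches : List String := ["expiry", "expiry of patent term"]

-- Source B's staged early-return passes (a for-loop that returns at the first hit = List.any)
def decodeLegal_alt (legal_comparator : String) : Option String :=
  if pvPlainSubstrings.any (fun kw => PySem.Str.isIn kw legal_comparator) then some "INACTIVE"
  else if pvAllOfGroups.any (fun g => g.all (fun p => PySem.Str.isIn p legal_comparator)) then some "INACTIVE"
  else if pvWithExceptions.any (fun r => PySem.Str.isIn r.1 legal_comparator && !(r.2.any (fun f => PySem.Str.isIn f legal_comparator))) then some "INACTIVE"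
  else if pvExactMatches.any (fun kw => kw == legal_comparator) then some "INACTIVE"
  else some "ACTIVE OR UNCERTAIN"

-- ===== PRECONDITION & SPEC =====
def Spec_decodeLegal (legal_comparator : String) (out : Option String) : Prop := out = decodeLegal_alt legal_comparator
instance (legal_comparator : String) (out : Option String) : Decidable (Spec_decodeLegal legal_comparator out) := by unfold Spec_decodeLegal; infer_instance

-- ===== CLAIM (what is proved, stated in full; the proofs are below) =====
def Claim_equal_decodeLegal : Prop := ∀ (legal_comparator : String), Dom_decodeLegal legal_comparator → Spec_decodeLegal legal_comparator (decodeLegal legal_comparator)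

-- ===== LEMMAS AND PROOFS =====

-- Proof-side canonical predicate: what one keyword of A's list decides.
def pvSignalsInactive (kw s : String) : Bool :=
  if PySem.Str.isIn "+" kw then
    ((PySem.Str.split? kw "+").getD []).all (fun p => PySem.Str.isIn p s)
  else if PySem.Str.isIn "-" kw then
    let parts := (PySem.Str.split? kw "-").getD []
    PySem.Str.isIn (PySem.List.pyGetD parts 0 "") s &&
      (PySem.List.slice parts (some 1) none).all (fun p => !PySem.Str.isIn p s)
  else if PySem.Str.isIn "§" kw then
    PySem.List.pyGetD ((PySem.Str.split? kw "§").getD []) 1 "" == s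
  else PySem.Str.isIn kw s

-- A's '+' counting loop hits its full count exactly when every part is a substring.
theorem pvPlusLoop (s : String) (keys : List String) :
    ((PySem.List.pyRange 0 (PySem.List.len keys) 1).foldl
      (fun kf i => if PySem.Str.isIn (PySem.List.pyGetD keys i "") s then kf + 1 else kf) (0:Int)
      == PySem.List.len keys)
    = keys.all (fun p => PySem.Str.isIn p s) := by
  rw [PySem.List.foldl_pyRange_zero_pyGetD (xs := keys) (d := "")
      (f := fun kf p => if PySem.Str.isIn p s then kf + 1 else kf) (init := (0:Int))]
  rw [PySem.List.foldl_if_add_one]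
  rw [Bool.eq_iff_iff]
  simp only [PySem.List.len_eq, zero_add, beq_iff_eq, Nat.cast_inj, List.all_eq_true]
  exact List.countP_eq_length

-- A's '-' counting loop hits (num-1) exactly when the head part is a substring
-- and no later part is (given ≥ 2 parts, which any keyword containing '-' yields).
theorem pvMinusLoop (s : String) (keys : List String) (h2 : 2 ≤ keys.length) :
    ((PySem.List.pyRange 1 (PySem.List.len keys) 1).foldl
      (fun kf i => if PySem.Str.isIn (PySem.List.pyGetD keys 0 "") s && !PySem.Str.isIn (PySem.List.pyGetD keys i "") s then kf + 1 else kf) (0:Int)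
      == PySem.List.len keys - 1)
    = (PySem.Str.isIn (PySem.List.pyGetD keys 0 "") s &&
        (PySem.List.slice keys (some 1) none).all (fun p => !PySem.Str.isIn p s)) := by
  rw [PySem.List.foldl_pyRange_pyGetD (a := 1) (xs := keys) (d := "")
      (f := fun kf p => if PySem.Str.isIn (PySem.List.pyGetD keys 0 "") s && !PySem.Str.isIn p s then kf + 1 else kf) (init := (0:Int)) (by norm_num)]
  rw [PySem.List.slice_from_one, ← List.drop_one]
  simp only [Int.toNat_one]
  cases hc : PySem.Str.isIn (PySem.List.pyGetD keys 0 "") s with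
  | false =>
    rw [Bool.eq_iff_iff]
    simp [PySem.List.len_eq]
    all_goals omega
  | true =>
    simp only [Bool.true_and]
    rw [PySem.List.foldl_if_add_one]
    rw [Bool.eq_iff_iff]
    simp only [PySem.List.len_eq, zero_add, beq_iff_eq, List.all_eq_true]
    have hdl : (keys.drop 1).length = keys.length - 1 := by simp
    have hcle : (keys.drop 1).countP (fun p => !PySem.Str.isIn p s) ≤ (keys.drop 1).length :=
      List.countP_le_length
    constructor
    · intro h p hp
      have hcnt : (keys.drop 1).countP (fun q => !PySem.Str.isIn q s) = (keys.drop 1).length := by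
        omega
      exact List.countP_eq_length.mp hcnt p hp
    · intro h
      have := List.countP_eq_length.mpr h
      omega

-- A's loop body, branch by branch (acc not yet INACTIVE).
theorem pvStepA_plus (s kw : String) (acc : Option String) (hacc : acc ≠ some "INACTIVE")
    (h1 : PySem.Str.isIn "+" kw = true) :
    pvStepA s acc kw =
      (if ((PySem.Str.split? kw "+").getD []).all (fun p => PySem.Str.isIn p s) then some "INACTIVE"
       else some "ACTIVE OR UNCERTAIN") := by
  have hg : (PySem.Str.isIn "+" kw && decide (acc ≠ some "INACTIVE")) = true := by
    rw [h1]; simp [hacc]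
  unfold pvStepA
  rw [if_pos hg]
  simp only [pvPlusLoop]

theorem pvStepA_minus (s kw : String) (acc : Option String) (hacc : acc ≠ some "INACTIVE")
    (h1 : PySem.Str.isIn "+" kw = false) (h2 : PySem.Str.isIn "-" kw = true)
    (hlen : 2 ≤ ((PySem.Str.split? kw "-").getD []).length) :
    pvStepA s acc kw =
      (if (PySem.Str.isIn (PySem.List.pyGetD ((PySem.Str.split? kw "-").getD []) 0 "") s &&
            (PySem.List.slice ((PySem.Str.split? kw "-").getD []) (some 1) none).all (fun p => !PySem.Str.isIn p s))
       then some "INACTIVE" else some "ACTIVE OR UNCERTAIN") := by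
  have hg2 : (PySem.Str.isIn "-" kw && decide (acc ≠ some "INACTIVE")) = true := by
    rw [h2]; simp [hacc]
  unfold pvStepA
  rw [if_neg (by rw [h1]; simp), if_pos hg2]
  simp only [pvMinusLoop s _ hlen]

theorem pvStepA_sect (s kw : String) (acc : Option String) (hacc : acc ≠ some "INACTIVE")
    (h1 : PySem.Str.isIn "+" kw = false) (h2 : PySem.Str.isIn "-" kw = false)
    (h3 : PySem.Str.isIn "§" kw = true) :
    pvStepA s acc kw =
      (if PySem.List.pyGetD ((PySem.Str.split? kw "§").getD []) 1 "" == s then some "INACTIVE"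
       else some "ACTIVE OR UNCERTAIN") := by
  have hg3 : (PySem.Str.isIn "§" kw && decide (acc ≠ some "INACTIVE")) = true := by
    rw [h3]; simp [hacc]
  unfold pvStepA
  rw [if_neg (by rw [h1]; simp), if_neg (by rw [h2]; simp), if_pos hg3]

theorem pvStepA_plain (s kw : String) (acc : Option String) (hacc : acc ≠ some "INACTIVE")
    (h1 : PySem.Str.isIn "+" kw = false) (h2 : PySem.Str.isIn "-" kw = false)
    (h3 : PySem.Str.isIn "§" kw = false) :
    pvStepA s acc kw =
      (if PySem.Str.isIn kw s then some "INACTIVE" else some "ACTIVE OR UNCERTAIN") := by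
  have hg4 : (decide (acc ≠ some "INACTIVE")) = true := by simp [hacc]
  unfold pvStepA
  rw [if_neg (by rw [h1]; simp), if_neg (by rw [h2]; simp), if_neg (by rw [h3]; simp), if_pos hg4]

-- Branch evaluations of the canonical predicate.
theorem pvSignals_plus (kw s : String) (h1 : PySem.Str.isIn "+" kw = true) :
    pvSignalsInactive kw s = ((PySem.Str.split? kw "+").getD []).all (fun p => PySem.Str.isIn p s) := by
  unfold pvSignalsInactive
  rw [if_pos h1]

theorem pvSignals_minus (kw s : String) (h1 : PySem.Str.isIn "+" kw = false)
    (h2 : PySem.Str.isIn "-" kw = true) :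
    pvSignalsInactive kw s =
      (PySem.Str.isIn (PySem.List.pyGetD ((PySem.Str.split? kw "-").getD []) 0 "") s &&
        (PySem.List.slice ((PySem.Str.split? kw "-").getD []) (some 1) none).all (fun p => !PySem.Str.isIn p s)) := by
  unfold pvSignalsInactive
  rw [if_neg (by rw [h1]; simp), if_pos h2]

theorem pvSignals_sect (kw s : String) (h1 : PySem.Str.isIn "+" kw = false)
    (h2 : PySem.Str.isIn "-" kw = false) (h3 : PySem.Str.isIn "§" kw = true) :
    pvSignalsInactive kw s = (PySem.List.pyGetD ((PySem.Str.split? kw "§").getD []) 1 "" == s) := by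
  unfold pvSignalsInactive
  rw [if_neg (by rw [h1]; simp), if_neg (by rw [h2]; simp), if_pos h3]

theorem pvSignals_plain (kw s : String) (h1 : PySem.Str.isIn "+" kw = false)
    (h2 : PySem.Str.isIn "-" kw = false) (h3 : PySem.Str.isIn "§" kw = false) :
    pvSignalsInactive kw s = PySem.Str.isIn kw s := by
  unfold pvSignalsInactive
  rw [if_neg (by rw [h1]; simp), if_neg (by rw [h2]; simp), if_neg (by rw [h3]; simp)]


-- For each keyword of the fixed list, A's loop body is: keep INACTIVE, else decide by the canonical predicate.
set_option maxHeartbeats 1600000 in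
theorem pvStepA_canon (s kw : String) (hkw : kw ∈ pvLibreList) (acc : Option String) :
    pvStepA s acc kw =
      if acc = some "INACTIVE" then acc
      else if pvSignalsInactive kw s then some "INACTIVE" else some "ACTIVE OR UNCERTAIN" := by
  by_cases hacc : acc = some "INACTIVE"
  · simp [pvStepA, hacc]
  · rw [if_neg hacc]
    by_cases h1 : PySem.Str.isIn "+" kw
    · rw [pvStepA_plus s kw acc hacc h1, pvSignals_plus kw s h1]
    · have h1f : PySem.Str.isIn "+" kw = false := by simpa using h1
      by_cases h2 : PySem.Str.isIn "-" kw
      · have hlen : 2 ≤ ((PySem.Str.split? kw "-").getD []).length := by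
          fin_cases hkw <;> first
            | exact absurd (by decide) h1
            | exact absurd h2 (by decide)
            | decide
        rw [pvStepA_minus s kw acc hacc h1f h2 hlen, pvSignals_minus kw s h1f h2]
      · have h2f : PySem.Str.isIn "-" kw = false := by simpa using h2
        by_cases h3 : PySem.Str.isIn "§" kw
        · rw [pvStepA_sect s kw acc hacc h1f h2f h3, pvSignals_sect kw s h1f h2f h3]
        · have h3f : PySem.Str.isIn "§" kw = false := by simpa using h3
          rw [pvStepA_plain s kw acc hacc h1f h2f h3f, pvSignals_plain kw s h1f h2f h3f]

-- A's whole fold over any sublist of the keyword list, characterised.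
theorem pvFold_canon (s : String) (l : List String) (hl : ∀ kw ∈ l, kw ∈ pvLibreList) (acc : Option String) :
    l.foldl (pvStepA s) acc =
      if acc = some "INACTIVE" ∨ l.any (fun kw => pvSignalsInactive kw s) then some "INACTIVE"
      else if l = [] then acc else some "ACTIVE OR UNCERTAIN" := by
  induction l generalizing acc with
  | nil => simp
  | cons kw l ih =>
    have hkw : kw ∈ pvLibreList := hl kw List.mem_cons_self
    have hl' : ∀ k ∈ l, k ∈ pvLibreList := fun k hk => hl k (List.mem_cons_of_mem _ hk)
    rw [List.foldl_cons, pvStepA_canon s kw hkw, ih hl']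
    by_cases hp : pvSignalsInactive kw s <;>
      by_cases hacc : acc = some "INACTIVE" <;>
      cases l <;> simp [hp, hacc]


-- Per-keyword evaluation of the canonical predicate on A's literal keywords.
theorem pvE1 (s : String) : pvSignalsInactive "patent revoked" s = PySem.Str.isIn "patent revoked" s :=
  pvSignals_plain _ s (by decide) (by decide) (by decide)

theorem pvE2 (s : String) : pvSignalsInactive "patent withdrawn" s = PySem.Str.isIn "patent withdrawn" s :=
  pvSignals_plain _ s (by decide) (by decide) (by decide)

theorem pvE3 (s : String) : pvSignalsInactive "abandonment of patent" s = PySem.Str.isIn "abandonment of patent" s :=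
  pvSignals_plain _ s (by decide) (by decide) (by decide)

theorem pvE4 (s : String) : pvSignalsInactive "abandonment or withdrawal" s = PySem.Str.isIn "abandonment or withdrawal" s :=
  pvSignals_plain _ s (by decide) (by decide) (by decide)

theorem pvE5 (s : String) : pvSignalsInactive "ceased due to" s = PySem.Str.isIn "ceased due to" s :=
  pvSignals_plain _ s (by decide) (by decide) (by decide)

theorem pvE6 (s : String) : pvSignalsInactive "patent ceased" s = PySem.Str.isIn "patent ceased" s :=
  pvSignals_plain _ s (by decide) (by decide) (by decide)

theorem pvE7 (s : String) : pvSignalsInactive "complete renunciation" s = PySem.Str.isIn "complete renunciation" s :=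
  pvSignals_plain _ s (by decide) (by decide) (by decide)

theorem pvE8 (s : String) : pvSignalsInactive "comple withdrawal" s = PySem.Str.isIn "comple withdrawal" s :=
  pvSignals_plain _ s (by decide) (by decide) (by decide)

theorem pvE9 (s : String) : pvSignalsInactive "spc revoked under" s = PySem.Str.isIn "spc revoked under" s :=
  pvSignals_plain _ s (by decide) (by decide) (by decide)

theorem pvE10 (s : String) : pvSignalsInactive "patent expired" s = PySem.Str.isIn "patent expired" s :=
  pvSignals_plain _ s (by decide) (by decide) (by decide)

theorem pvE11 (s : String) : pvSignalsInactive "extended patent has ceased" s = PySem.Str.isIn "extended patent has ceased" s :=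
  pvSignals_plain _ s (by decide) (by decide) (by decide)

theorem pvE12 (s : String) : pvSignalsInactive "lapsed due to" s = PySem.Str.isIn "lapsed due to" s :=
  pvSignals_plain _ s (by decide) (by decide) (by decide)

theorem pvE13 (s : String) : pvSignalsInactive "deemed to be withdrawn" s = PySem.Str.isIn "deemed to be withdrawn" s :=
  pvSignals_plain _ s (by decide) (by decide) (by decide)

theorem pvE14 (s : String) : pvSignalsInactive "expiry+spc" s = (["expiry", "spc"].all fun p => PySem.Str.isIn p s) := by
  rw [pvSignals_plus _ s (by decide), (show (PySem.Str.split? "expiry+spc" "+").getD [] = ["expiry", "spc"] by decide)]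

theorem pvE15 (s : String) : pvSignalsInactive "expiry+supplementary protection" s = (["expiry", "supplementary protection"].all fun p => PySem.Str.isIn p s) := by
  rw [pvSignals_plus _ s (by decide), (show (PySem.Str.split? "expiry+supplementary protection" "+").getD [] = ["expiry", "supplementary protection"] by decide)]

theorem pvE16 (s : String) : pvSignalsInactive "expiry+complementary protection certificate" s = (["expiry", "complementary protection certificate"].all fun p => PySem.Str.isIn p s) := by
  rw [pvSignals_plus _ s (by decide), (show (PySem.Str.split? "expiry+complementary protection certificate" "+").getD [] = ["expiry", "complementary protection certificate"] by decide)]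

theorem pvE17 (s : String) : pvSignalsInactive "patent lapsed-:" s = (PySem.Str.isIn "patent lapsed" s && ([":"].all fun p => !PySem.Str.isIn p s)) := by
  rw [pvSignals_minus _ s (by decide) (by decide),
    (show (PySem.Str.split? "patent lapsed-:" "-").getD [] = ["patent lapsed", ":"] by decide),
    (show PySem.List.pyGetD ["patent lapsed", ":"] 0 "" = "patent lapsed" by decide),
    (show PySem.List.slice ["patent lapsed", ":"] (some 1) none = [":"] by decide)]

theorem pvE18 (s : String) : pvSignalsInactive "§expiry" s = ("expiry" == s) := by
  rw [pvSignals_sect _ s (by decide) (by decide) (by decide),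
    (show PySem.List.pyGetD ((PySem.Str.split? "§expiry" "§").getD []) 1 "" = "expiry" by decide)]

theorem pvE19 (s : String) : pvSignalsInactive "§expiry of patent term" s = ("expiry of patent term" == s) := by
  rw [pvSignals_sect _ s (by decide) (by decide) (by decide),
    (show PySem.List.pyGetD ((PySem.Str.split? "§expiry of patent term" "§").getD []) 1 "" = "expiry of patent term" by decide)]

-- The canonical predicate over A's keyword list equals B's four staged table checks.
set_option maxHeartbeats 1600000 in
theorem pvAny_eq (s : String) :
    pvLibreList.any (fun kw => pvSignalsInactive kw s) =
      (pvPlainSubstrings.any (fun kw => PySem.Str.isIn kw s)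
        || pvAllOfGroups.any (fun g => g.all (fun p => PySem.Str.isIn p s))
        || pvWithExceptions.any (fun r => PySem.Str.isIn r.1 s && !(r.2.any (fun f => PySem.Str.isIn f s)))
        || pvExactMatches.any (fun kw => kw == s)) := by
  simp only [pvLibreList, List.any_cons, List.any_nil, pvE1, pvE2, pvE3, pvE4, pvE5, pvE6, pvE7, pvE8, pvE9, pvE10, pvE11, pvE12, pvE13, pvE14, pvE15, pvE16, pvE17, pvE18, pvE19]
  simp only [pvPlainSubstrings, pvAllOfGroups, pvWithExceptions, pvExactMatches,
    List.any_cons, List.any_nil]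
  simp only [List.all_cons, List.all_nil, Bool.and_true, Bool.or_false, Bool.or_assoc]

-- ===== VERDICT (by name: the statement is the Claim_ definition above) =====
set_option maxHeartbeats 1600000 in
theorem decodeLegal_spec : Claim_equal_decodeLegal := by
  intro s _
  unfold Spec_decodeLegal decodeLegal decodeLegal_alt
  rw [pvFold_canon s pvLibreList (fun _ h => h) none, pvAny_eq]
  rw [if_neg (show ¬ (pvLibreList = []) by simp [pvLibreList])]
  generalize pvPlainSubstrings.any (fun kw => PySem.Str.isIn kw s) = b1
  generalize pvAllOfGroups.any (fun g => g.all (fun p => PySem.Str.isIn p s)) = b2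
  generalize pvWithExceptions.any (fun r => PySem.Str.isIn r.1 s && !(r.2.any (fun f => PySem.Str.isIn f s))) = b3
  generalize pvExactMatches.any (fun kw => kw == s) = b4
  cases b1 <;> cases b2 <;> cases b3 <;> cases b4 <;> simp
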